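-- pv_equiv track=rewrite | github.com/hugh-zhan9/agent-skills | flight-recorder/scripts/log_change.py | parse_named_args
-- ===== SOURCE A (Python) =====
-- def parse_named_args(argv):
--     mapping = {}
--     i = 1
--     while i < len(argv):
--         token = argv[i]
--         if not token.startswith("--"):
--             i += 1
--             continue
--         key = token[2:]
--         if i + 1 >= len(argv):
--             mapping[key] = ""
--             break
--         mapping[key] = argv[i + 1]
--         i += 2
--     return mapping
-- ===== SOURCE B (Python) =====
-- def parse_named_args(argv):
--     tokens = argv[1:]
--     flags = [j for j, t in enumerate(tokens) if t.startswith("--")]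
--     mapping = {}
--     blocked = None
--     for j in flags:
--         if j == blocked:
--             continue
--         mapping[tokens[j][2:]] = tokens[j + 1] if j + 1 < len(tokens) else ""
--         blocked = j + 1
--     return mapping
-- ===== Notes on version B (the rewrite author's own statement) =====
-- stated objective: alternative
-- what changed: Replaces A's single consume-the-next-token index loop with two staged passes: first a comprehension collects the positions of all '--' flags, then a fold over that position list assigns each unconsumed flag the following token, skipping positions already consumed as values via a 'blocked' marker.
import Mathlib
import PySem

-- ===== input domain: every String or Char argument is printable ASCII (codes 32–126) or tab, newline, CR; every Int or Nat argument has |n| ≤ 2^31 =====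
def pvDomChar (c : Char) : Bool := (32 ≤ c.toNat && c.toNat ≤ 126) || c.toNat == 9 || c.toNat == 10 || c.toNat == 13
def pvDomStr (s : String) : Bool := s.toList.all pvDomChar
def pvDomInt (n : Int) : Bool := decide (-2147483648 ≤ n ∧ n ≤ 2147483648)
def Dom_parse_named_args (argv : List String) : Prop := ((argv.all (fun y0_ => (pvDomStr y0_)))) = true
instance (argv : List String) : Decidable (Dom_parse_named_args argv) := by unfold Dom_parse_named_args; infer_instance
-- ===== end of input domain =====

-- B replaces A's consume-the-next-token index loop by two staged passes: collect all
-- flag positions first, then fold over them with a 'blocked' marker for consumed positions.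

-- ===== PORT A =====
-- while-loop with index i; terminates since argv.length - i decreases
def parseLoopA (argv : List String) (d : PySem.Dict String String) (i : Nat) :
    PySem.Dict String String :=
  if h : i < argv.length then
    let token := argv[i]
    if ¬ (PySem.Str.startswith token "--") then
      parseLoopA argv d (i + 1)
    else
      let key := PySem.Str.slice token (some 2) none
      if argv.length ≤ i + 1 then
        d.insert key ""
      else
        parseLoopA argv (d.insert key (argv.getD (i + 1) "")) (i + 2)
  else d
termination_by argv.length - i

def parse_named_args (argv : List String) : List (String × String) :=
  (parseLoopA argv PySem.Dict.empty 1).items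

-- ===== PORT B =====
-- pass 1: flags = [j for j, t in enumerate(tokens) if t.startswith("--")]
-- pass 2: fold over flags with state (mapping, blocked)
def parse_named_args_alt (argv : List String) : List (String × String) :=
  let tokens := PySem.List.slice argv (some 1) none
  let flags := ((PySem.List.enumerate tokens).filter
      (fun p => PySem.Str.startswith p.2 "--")).map (fun p => p.1)
  let st := flags.foldl
    (fun (st : PySem.Dict String String × Option Int) j =>
      if some j == st.2 then st
      else
        (st.1.insert (PySem.Str.slice (PySem.List.pyGetD tokens j "") (some 2) none)
           (if j + 1 < (tokens.length : Int) then PySem.List.pyGetD tokens (j + 1) "" else ""),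
         some (j + 1)))
    (PySem.Dict.empty, none)
  st.1.items

-- ===== PRECONDITION & SPEC =====
def Spec_parse_named_args (argv : List String) (out : List (String × String)) : Prop := out = parse_named_args_alt argv
instance (argv : List String) (out : List (String × String)) : Decidable (Spec_parse_named_args argv out) := by unfold Spec_parse_named_args; infer_instance

-- ===== CLAIM (what is proved, stated in full; the proofs are below) =====
def Claim_equal_parse_named_args : Prop := ∀ (argv : List String), Dom_parse_named_args argv → Spec_parse_named_args argv (parse_named_args argv)

-- ===== LEMMAS AND PROOFS =====

-- proof-only intermediate: the one-pass structural scan over the token list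
def scanMid : List String → PySem.Dict String String → PySem.Dict String String
  | [], d => d
  | [token], d =>
    if PySem.Str.startswith token "--" then
      (d.insert (PySem.Str.slice token (some 2) none) "")
    else d
  | token :: v :: rest, d =>
    if PySem.Str.startswith token "--" then
      scanMid rest (d.insert (PySem.Str.slice token (some 2) none) v)
    else scanMid (v :: rest) d

lemma parseLoopA_eq_scanMid (argv : List String) (i : Nat) (d : PySem.Dict String String) :
    parseLoopA argv d i = scanMid (argv.drop i) d := by
  induction hn : argv.length - i using Nat.strong_induction_on generalizing i d with
  | _ n ih =>
  rw [parseLoopA]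
  by_cases h : i < argv.length
  · rw [dif_pos h]
    by_cases h2 : argv.length ≤ i + 1
    · have hnil : argv.drop (i + 1) = [] := List.drop_eq_nil_of_le h2
      have hdrop : argv.drop i = [argv[i]] := by
        rw [List.drop_eq_getElem_cons h, hnil]
      rw [hdrop, scanMid]
      by_cases hs : PySem.Str.startswith argv[i] "--" = true
      · rw [if_neg (by simp only [hs, not_true]; exact not_false), if_pos h2, if_pos hs]
      · rw [if_pos (by exact hs), if_neg hs,
            ih (argv.length - (i + 1)) (by omega) (i + 1) d rfl, hnil, scanMid]
    · rw [Nat.not_le] at h2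
      have hdrop2 : argv.drop (i + 1) = argv[i + 1] :: argv.drop (i + 2) :=
        List.drop_eq_getElem_cons h2
      have hdrop : argv.drop i = argv[i] :: argv[i + 1] :: argv.drop (i + 2) := by
        rw [List.drop_eq_getElem_cons h, hdrop2]
      rw [hdrop, scanMid]
      by_cases hs : PySem.Str.startswith argv[i] "--" = true
      · rw [if_neg (by simp only [hs, not_true]; exact not_false), if_neg (by omega),
            if_pos hs, List.getD_eq_getElem _ _ h2]
        exact ih (argv.length - (i + 2)) (by omega) (i + 2) _ rfl
      · rw [if_pos (by exact hs), if_neg hs, ← hdrop2]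
        exact ih (argv.length - (i + 1)) (by omega) (i + 1) d rfl
  · rw [dif_neg h, List.drop_eq_nil_of_le (by omega), scanMid]

-- the step function of B's fold, with the full token list fixed
def stepB (tokens : List String) (st : PySem.Dict String String × Option Int) (j : Int) :
    PySem.Dict String String × Option Int :=
  if some j == st.2 then st
  else
    (st.1.insert (PySem.Str.slice (PySem.List.pyGetD tokens j "") (some 2) none)
       (if j + 1 < (tokens.length : Int) then PySem.List.pyGetD tokens (j + 1) "" else ""),
     some (j + 1))

-- flag positions of a suffix starting at offset n
def flagsFrom (n : Int) : List String → List Int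
  | [] => []
  | t :: rest =>
      (if PySem.Str.startswith t "--" then [n] else []) ++ flagsFrom (n + 1) rest

lemma flags_eq_flagsFrom (l : List String) (n : Int) :
    ((PySem.List.enumerate l n).filter
      (fun p => PySem.Str.startswith p.2 "--")).map (fun p => p.1) = flagsFrom n l := by
  induction l generalizing n with
  | nil => simp [PySem.List.enumerate_nil, flagsFrom]
  | cons t rest ih =>
    rw [PySem.List.enumerate_cons, flagsFrom]
    simp only [List.filter_cons]
    by_cases hs : PySem.Chars.startswith t.toList ['-', '-'] = true <;>
      simp [hs] <;> simpa using ih (n + 1)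

lemma fold_blocked_irrel (tokens l : List String) (n k : Int) (hk : k < n)
    (d : PySem.Dict String String) :
    ((flagsFrom n l).foldl (stepB tokens) (d, some k)).1
      = ((flagsFrom n l).foldl (stepB tokens) (d, none)).1 := by
  induction l generalizing n d with
  | nil => simp [flagsFrom]
  | cons t rest ih =>
    rw [flagsFrom]
    by_cases hs : PySem.Str.startswith t "--" = true
    · simp only [hs, if_pos, List.singleton_append, List.foldl_cons]
      have h1 : stepB tokens (d, some k) n = stepB tokens (d, none) n := by
        simp [stepB]; omega
      rw [h1]
    · simp only [hs, if_neg, Bool.false_eq_true, not_false_iff, List.nil_append]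
      exact ih (n + 1) (by omega) d

lemma fold_eq_scanMid (tokens rest : List String) (n : Nat)
    (hrest : rest = tokens.drop n) (d : PySem.Dict String String) :
    ((flagsFrom (n : Int) rest).foldl (stepB tokens) (d, none)).1 = scanMid rest d := by
  induction hlen : rest.length using Nat.strong_induction_on generalizing rest n d with
  | _ m ih
  match rest, hrest with
  | [], _ => simp [flagsFrom, scanMid]
  | [t], hrest =>
    have hlen1 : tokens.length = n + 1 := by
      have := congrArg List.length hrest; simp at this; omega
    have ht : PySem.List.pyGetD tokens (n : Int) "" = t := by
      rw [PySem.List.pyGetD_natCast]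
      have h0 : (tokens.drop n)[0]? = some t := by rw [← hrest]; rfl
      rw [List.getElem?_drop, Nat.add_zero] at h0
      simp [h0]
    have hlt : ¬ ((n : Int) + 1 < (tokens.length : Int)) := by
      rw [hlen1]; push_cast; omega
    rw [flagsFrom, scanMid]
    by_cases hs : PySem.Str.startswith t "--" = true
    · simp only [hs, if_pos, flagsFrom, List.append_nil,
        List.foldl_cons, List.foldl_nil]
      simp [stepB, ht, hlt]
    · simp only [hs, Bool.false_eq_true, if_neg, not_false_iff, List.nil_append,
        flagsFrom, List.foldl_nil]
  | t :: v :: rr, hrest =>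
    have hn1 : n + 1 < tokens.length := by
      have := congrArg List.length hrest; simp at this; omega
    have ht : PySem.List.pyGetD tokens (n : Int) "" = t := by
      rw [PySem.List.pyGetD_natCast]
      have h0 : (tokens.drop n)[0]? = some t := by rw [← hrest]; rfl
      rw [List.getElem?_drop, Nat.add_zero] at h0
      simp [h0]
    have hrest' : v :: rr = tokens.drop (n + 1) := by
      have := congrArg List.tail hrest
      simpa [List.tail_drop] using this
    have hv : PySem.List.pyGetD tokens ((n : Int) + 1) "" = v := by
      have hc : ((n : Int) + 1) = ((n + 1 : Nat) : Int) := by push_cast; ring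
      rw [hc, PySem.List.pyGetD_natCast]
      have h0 : (tokens.drop (n + 1))[0]? = some v := by rw [← hrest']; rfl
      rw [List.getElem?_drop, Nat.add_zero] at h0
      simp [h0]
    have hrr : rr = tokens.drop (n + 2) := by
      have := congrArg List.tail hrest'
      simpa [List.tail_drop] using this
    rw [flagsFrom, scanMid]
    by_cases hs : PySem.Str.startswith t "--" = true
    · simp only [hs, if_pos, List.singleton_append, List.foldl_cons]
      have hstep : stepB tokens (d, none) (n : Int)
          = (d.insert (PySem.Str.slice t (some 2) none) v, some ((n : Int) + 1)) := by
        have hlt : (n : Int) + 1 < (tokens.length : Int) := by exact_mod_cast hn1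
        simp [stepB, ht, hv, hlt]
      rw [hstep]
      set d' := d.insert (PySem.Str.slice t (some 2) none) v with hd'
      rw [flagsFrom]
      by_cases hv2 : PySem.Str.startswith v "--" = true
      · simp only [hv2, if_pos, List.singleton_append, List.foldl_cons]
        have hskip : stepB tokens (d', some ((n : Int) + 1)) ((n : Int) + 1)
            = (d', some ((n : Int) + 1)) := by simp [stepB]
        rw [hskip]
        have hcast : (n : Int) + 1 + 1 = ((n + 2 : Nat) : Int) := by push_cast; ring
        rw [hcast, fold_blocked_irrel tokens rr ((n + 2 : Nat) : Int) ((n : Int) + 1)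
              (by push_cast; omega) d']
        exact ih rr.length (by simp at hlen ⊢; omega) rr (n + 2) hrr d' rfl
      · simp only [hv2, Bool.false_eq_true, if_neg, not_false_iff, List.nil_append]
        have hcast : (n : Int) + 1 + 1 = ((n + 2 : Nat) : Int) := by push_cast; ring
        rw [hcast, fold_blocked_irrel tokens rr ((n + 2 : Nat) : Int) ((n : Int) + 1)
              (by push_cast; omega) d']
        exact ih rr.length (by simp at hlen ⊢; omega) rr (n + 2) hrr d' rfl
    · simp only [hs, Bool.false_eq_true, if_neg, not_false_iff, List.nil_append]
      have hcast : (n : Int) + 1 = ((n + 1 : Nat) : Int) := by push_cast; ring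
      rw [hcast]
      exact ih (v :: rr).length (by simp at hlen ⊢; omega) (v :: rr) (n + 1) hrest' d rfl

-- ===== VERDICT (by name: the statement is the Claim_ definition above) =====
theorem parse_named_args_spec : Claim_equal_parse_named_args := by
  intro argv _
  unfold Spec_parse_named_args parse_named_args parse_named_args_alt
  rw [PySem.List.slice_from_one, parseLoopA_eq_scanMid, List.drop_one]
  congr 1
  rw [flags_eq_flagsFrom]
  exact (fold_eq_scanMid argv.tail argv.tail 0 (by simp) PySem.Dict.empty).symm
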